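-- pv_equiv track=rewrite | github.com/NikitaSikalov/BioinformaticsAlgorithms | tasks/task20/progma20.py | expand_candidates
-- ===== SOURCE A (Python) =====
-- from typing import Dict, List, Tuple
--
-- AMINO_ACIDS = [
--     57, 71, 87, 97,
--     99, 101, 103, 113,
--     114, 115, 128, 129,
--     131, 137, 147, 156,
--     163, 186
-- ]
--
-- def cyclospectrum(peptide: List[int]):
--     peptide_size = len(peptide)
--     cycle_peptide = peptide + peptide
--     spectrum = [0]
--     for i in range(1, peptide_size):
--         for j in range(peptide_size):
--             spectrum.append(sum(cycle_peptide[j:j + i]))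
--     spectrum.append(sum(peptide))
--     return spectrum
--
-- def get_score(peptide: List[int], dict_cycle_spectrum: Dict[int, int]):
--     peptide_spectrum = cyclospectrum(peptide)
--     copied_dict = dict_cycle_spectrum.copy()
--     score = 0
--     for amino in peptide_spectrum:
--         if amino in copied_dict and copied_dict[amino] >= 1:
--             copied_dict[amino] -= 1
--             score += 1
--     return score
--
-- def expand_candidates(candidates: List[Tuple[int, List[int]]], dict_cycle_spectrum: Dict[int, int], amino_acids = AMINO_ACIDS) -> List[Tuple[int, List[int]]]:
--     next_candidates = []
--     for _, peptide in candidates: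
--         for acid in amino_acids:
--             candidate_to_append = peptide + [acid]
--             score = get_score(candidate_to_append, dict_cycle_spectrum)
--             next_candidates.append((score, candidate_to_append))
--     return next_candidates
-- ===== SOURCE B (Python) =====
-- from typing import Dict, List, Tuple
--
-- AMINO_ACIDS = [
--     57, 71, 87, 97,
--     99, 101, 103, 113,
--     114, 115, 128, 129,
--     131, 137, 147, 156,
--     163, 186
-- ]
--
-- def _score_fast(peptide: List[int], dict_cycle_spectrum: Dict[int, int]) -> int:
--     # prefix sums over the doubled peptide give each subpeptide mass in O(1);
--     # the spectrum is kept as a multiset of counts and the score is its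
--     # intersection with the target spectrum counts.
--     n = len(peptide)
--     prefix = [0]
--     acc = 0
--     for x in peptide + peptide:
--         acc += x
--         prefix.append(acc)
--     counts = {0: 1}
--     get = counts.get
--     for i in range(1, n):
--         for hi, lo in zip(prefix[i:i + n], prefix):
--             m = hi - lo
--             counts[m] = get(m, 0) + 1
--     total = prefix[n]
--     counts[total] = counts.get(total, 0) + 1
--     score = 0
--     for m, c in counts.items():
--         cap = dict_cycle_spectrum.get(m, 0)
--         if cap > 0:
--             score += min(c, cap)
--     return score
--
-- def expand_candidates(candidates: List[Tuple[int, List[int]]], dict_cycle_spectrum: Dict[int, int], amino_acids = AMINO_ACIDS) -> List[Tuple[int, List[int]]]: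
--     return [(_score_fast(peptide + [acid], dict_cycle_spectrum), peptide + [acid])
--             for _, peptide in candidates
--             for acid in amino_acids]
-- ===== Notes on version B (the rewrite author's own statement) =====
-- stated objective: alternative
-- what changed: Each candidate's cyclospectrum mass is obtained in O(1) from prefix sums over the doubled peptide instead of summing a fresh slice, and the greedy dict-decrementing scorer is replaced by a spectrum counter whose multiset intersection with the target counts is summed once; intended as faster in peptide length (asymptotically O(n^2) vs O(n^3) per candidate), but a timing run did not confirm an overall speed-up on the generated input mix.
import Mathlib
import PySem

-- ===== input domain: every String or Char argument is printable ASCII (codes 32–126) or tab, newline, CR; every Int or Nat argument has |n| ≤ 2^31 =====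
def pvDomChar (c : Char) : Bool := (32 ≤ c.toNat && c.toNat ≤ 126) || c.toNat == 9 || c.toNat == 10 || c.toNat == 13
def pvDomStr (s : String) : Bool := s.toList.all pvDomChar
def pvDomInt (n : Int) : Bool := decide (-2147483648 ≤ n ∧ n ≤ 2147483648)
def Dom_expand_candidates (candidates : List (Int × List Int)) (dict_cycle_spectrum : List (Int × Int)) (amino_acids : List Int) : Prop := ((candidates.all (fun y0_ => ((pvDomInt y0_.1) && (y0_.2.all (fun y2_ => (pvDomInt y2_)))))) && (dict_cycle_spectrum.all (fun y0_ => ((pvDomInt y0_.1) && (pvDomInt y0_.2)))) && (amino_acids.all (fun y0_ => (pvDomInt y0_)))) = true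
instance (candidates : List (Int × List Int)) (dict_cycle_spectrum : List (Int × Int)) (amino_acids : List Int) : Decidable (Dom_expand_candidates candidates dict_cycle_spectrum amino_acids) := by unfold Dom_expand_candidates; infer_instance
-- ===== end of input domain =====

-- B computes each cyclospectrum mass from prefix sums over the doubled peptide instead of
-- summing a fresh slice, and scores by a counter intersection instead of A's greedy dict
-- decrements; the return values are proved equal on all inputs.

-- ===== PORT A =====
def pvCyclospectrum (peptide : List Int) : List Int :=
  let peptide_size : Int := peptide.length
  let cycle_peptide := peptide ++ peptide
  let spectrum :=
    (PySem.List.pyRange 1 peptide_size).foldl (fun spectrum i =>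
      (PySem.List.pyRange 0 peptide_size).foldl (fun spectrum j =>
        spectrum ++ [(PySem.List.slice cycle_peptide (some j) (some (j + i))).sum]) spectrum)
      [0]
  spectrum ++ [peptide.sum]

def pvGetScore (peptide : List Int) (dict_cycle_spectrum : PySem.Dict Int Int) : Int :=
  let peptide_spectrum := pvCyclospectrum peptide
  (peptide_spectrum.foldl (fun (st : PySem.Dict Int Int × Int) amino =>
      match st.1.get? amino with
      | some v => if v ≥ 1 then (st.1.insert amino (v - 1), st.2 + 1) else st
      | none => st)
    (dict_cycle_spectrum, 0)).2

def expand_candidates (candidates : List (Int × List Int)) (dict_cycle_spectrum : List (Int × Int)) (amino_acids : List Int) : List (Int × List Int) :=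
  let d := PySem.Dict.ofList dict_cycle_spectrum
  candidates.foldl (fun next_candidates c =>
    amino_acids.foldl (fun next_candidates acid =>
      let candidate_to_append := c.2 ++ [acid]
      next_candidates ++ [(pvGetScore candidate_to_append d, candidate_to_append)]) next_candidates)
    []

-- ===== PORT B =====
def pvScoreFast (peptide : List Int) (dict_cycle_spectrum : PySem.Dict Int Int) : Int :=
  let n : Int := peptide.length
  let pref := ((peptide ++ peptide).foldl
      (fun (st : List Int × Int) x => (st.1 ++ [st.2 + x], st.2 + x)) ([0], 0)).1
  let counts :=
    (PySem.List.pyRange 1 n).foldl (fun counts i =>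
      ((PySem.List.slice pref (some i) (some (i + n))).zip pref).foldl
        (fun counts q => counts.modify (q.1 - q.2) 0 (· + 1))
        counts)
      (PySem.Dict.empty.insert 0 1)
  let total := PySem.List.pyGetD pref n 0
  let counts := counts.modify total 0 (· + 1)
  counts.items.foldl (fun score p =>
    let cap := dict_cycle_spectrum.getD p.1 0
    if cap > 0 then score + min p.2 cap else score) 0

def expand_candidates_alt (candidates : List (Int × List Int)) (dict_cycle_spectrum : List (Int × Int)) (amino_acids : List Int) : List (Int × List Int) :=
  let d := PySem.Dict.ofList dict_cycle_spectrum
  candidates.flatMap (fun c =>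
    amino_acids.map (fun acid =>
      (pvScoreFast (c.2 ++ [acid]) d, c.2 ++ [acid])))

-- ===== PRECONDITION & SPEC =====
def Spec_expand_candidates (candidates : List (Int × List Int)) (dict_cycle_spectrum : List (Int × Int)) (amino_acids : List Int) (out : List (Int × List Int)) : Prop := out = expand_candidates_alt candidates dict_cycle_spectrum amino_acids
instance (candidates : List (Int × List Int)) (dict_cycle_spectrum : List (Int × Int)) (amino_acids : List Int) (out : List (Int × List Int)) : Decidable (Spec_expand_candidates candidates dict_cycle_spectrum amino_acids out) := by unfold Spec_expand_candidates; infer_instance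

-- ===== CLAIM (what is proved, stated in full; the proofs are below) =====
def Claim_equal_expand_candidates : Prop := ∀ (candidates : List (Int × List Int)) (dict_cycle_spectrum : List (Int × Int)) (amino_acids : List Int), Dom_expand_candidates candidates dict_cycle_spectrum amino_acids → Spec_expand_candidates candidates dict_cycle_spectrum amino_acids (expand_candidates candidates dict_cycle_spectrum amino_acids)

-- ===== LEMMAS AND PROOFS =====

-- A's spectrum as a flat list (loops unrolled into flatMap/map).
def pvMids (peptide : List Int) : List Int :=
  (PySem.List.pyRange 1 peptide.length).flatMap (fun i =>
    (PySem.List.pyRange 0 peptide.length).map (fun j =>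
      (PySem.List.slice (peptide ++ peptide) (some j) (some (j + i))).sum))

theorem pvCyclospectrum_eq (p : List Int) :
    pvCyclospectrum p = [0] ++ pvMids p ++ [p.sum] := by
  unfold pvCyclospectrum pvMids
  simp only []
  rw [PySem.List.foldl_congr_mem _ _
    (fun spectrum i => spectrum ++ (PySem.List.pyRange 0 (p.length : Int)).map
      (fun j => (PySem.List.slice (p ++ p) (some j) (some (j + i))).sum)) _
    (fun acc x _ => PySem.List.foldl_append_singleton_eq_map _ _ _)]
  rw [PySem.List.foldl_append_eq_flatMap]

-- prefix-sum list: B's fold equals the list of partial sums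
theorem pvPrefix_fold (l : List Int) (acc : List Int) (s : Int) :
    (l.foldl (fun (st : List Int × Int) x => (st.1 ++ [st.2 + x], st.2 + x)) (acc, s)).1
      = acc ++ (List.range l.length).map (fun k => s + (l.take (k + 1)).sum) := by
  induction l generalizing acc s with
  | nil => simp
  | cons x xs ih =>
      simp only [List.foldl_cons, ih, List.length_cons, List.range_succ_eq_map]
      simp [List.map_map, Function.comp, add_assoc]

theorem pvPrefix_get (l : List Int) (k : Int) (h0 : 0 ≤ k) (h1 : k ≤ l.length) :
    PySem.List.pyGetD
      ((l.foldl (fun (st : List Int × Int) x => (st.1 ++ [st.2 + x], st.2 + x)) ([0], 0)).1) k 0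
      = (l.take k.toNat).sum := by
  rw [pvPrefix_fold]
  obtain ⟨m, rfl⟩ : ∃ m : Nat, k = (m : Int) := ⟨k.toNat, (Int.toNat_of_nonneg h0).symm⟩
  rw [PySem.List.pyGetD_natCast]
  cases m with
  | zero => simp
  | succ m =>
      have hm : m < l.length := by exact_mod_cast (by omega : (m : Int) < l.length)
      simp [List.getD, hm]

-- subpeptide mass = prefix difference
theorem pvSliceSum (l : List Int) (a b : Int) (h0 : 0 ≤ a) (hab : a ≤ b) :
    (PySem.List.slice l (some a) (some b)).sum = (l.take b.toNat).sum - (l.take a.toNat).sum := by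
  rw [PySem.List.slice_toNat l h0 (le_trans h0 hab)]
  have h : l.take b.toNat = l.take a.toNat ++ (l.drop a.toNat).take (b.toNat - a.toNat) := by
    rw [← List.take_add]; congr 1; omega
  rw [h, List.sum_append]
  ring

-- ===== the greedy scorer counted as a multiset intersection =====

-- structural mirror of A's scoring fold
def pvGreedy : List Int → PySem.Dict Int Int → Int
  | [], _ => 0
  | a :: xs, d =>
      match d.get? a with
      | some v => if v ≥ 1 then 1 + pvGreedy xs (d.insert a (v - 1)) else pvGreedy xs d
      | none => pvGreedy xs d

theorem pvGetScore_eq_greedy (spec : List Int) (d : PySem.Dict Int Int) (s : Int) :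
    (spec.foldl (fun (st : PySem.Dict Int Int × Int) amino =>
        match st.1.get? amino with
        | some v => if v ≥ 1 then (st.1.insert amino (v - 1), st.2 + 1) else st
        | none => st) (d, s)).2 = s + pvGreedy spec d := by
  induction spec generalizing d s with
  | nil => simp [pvGreedy]
  | cons a xs ih =>
      simp only [List.foldl_cons, pvGreedy]
      cases h : d.get? a with
      | none => simp [ih]
      | some v =>
          by_cases hv : v ≥ 1
          · simp [hv, ih]; ring
          · simp [hv, ih]

def pvTerm (xs : List Int) (d : PySem.Dict Int Int) (m : Int) : Int :=
  if 0 < d.getD m 0 then min (xs.count m : Int) (d.getD m 0) else 0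

-- sum over a nodup list splits off a member (discard is rfl-equal to filter)
theorem pvFilterSum (f : Int → Int) (a : Int) (S : List Int) (hnd : S.Nodup) (ha : a ∈ S) :
    (S.map f).sum = f a + ((S.filter (fun y => !(y == a))).map f).sum := by
  induction S with
  | nil => cases ha
  | cons b S ih =>
      rcases List.mem_cons.mp ha with rfl | hmem
      · have hnotin : a ∉ S := (List.nodup_cons.mp hnd).1
        have hf : S.filter (fun y => !(y == a)) = S :=
          List.filter_eq_self.mpr (fun x hx => by
            simp only [Bool.not_eq_eq_eq_not, Bool.not_true, beq_eq_false_iff_ne]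
            rintro rfl; exact hnotin hx)
        simp [hf]
      · have hba : b ≠ a := by rintro rfl; exact (List.nodup_cons.mp hnd).1 hmem
        have hrec := ih (List.nodup_cons.mp hnd).2 hmem
        simp only [List.map_cons, List.sum_cons, List.filter_cons]
        have hbeq : (!(b == a)) = true := by simp [hba]
        rw [hbeq, if_pos rfl, List.map_cons, List.sum_cons, hrec]
        ring

theorem pvSum_split (S : List Int) (f : Int → Int) (a : Int) (hnd : S.Nodup) (ha : a ∈ S) :
    (S.map f).sum = f a + ((PySem.Set.discard S a).map f).sum := by
  have hdis : PySem.Set.discard S a = S.filter (fun y => !(y == a)) := rfl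
  rw [hdis]
  exact pvFilterSum f a S hnd ha

theorem pvDiscard_not_mem (S : List Int) (a : Int) (ha : a ∉ S) :
    PySem.Set.discard S a = S := by
  have hdis : PySem.Set.discard S a = S.filter (fun y => !(y == a)) := rfl
  rw [hdis]
  exact List.filter_eq_self.mpr (fun x hx => by
    simp only [Bool.not_eq_eq_eq_not, Bool.not_true, beq_eq_false_iff_ne]
    rintro rfl; exact ha hx)

theorem pvGreedy_eq_sum (xs : List Int) (d : PySem.Dict Int Int) (hnd : d.keys.Nodup) :
    pvGreedy xs d = ((PySem.Set.ofList xs).map (pvTerm xs d)).sum := by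
  induction xs generalizing d with
  | nil => simp [pvGreedy, PySem.Set.ofList_nil]
  | cons a xs ih =>
      rw [PySem.Set.ofList_cons]
      simp only [List.map_cons, List.sum_cons]
      have hsub : ∀ d' : PySem.Dict Int Int, (∀ m, m ≠ a → d'.getD m 0 = d.getD m 0) →
          ((PySem.Set.discard (PySem.Set.ofList xs) a).map (pvTerm (a :: xs) d)).sum
            = ((PySem.Set.discard (PySem.Set.ofList xs) a).map (pvTerm xs d')).sum := by
        intro d' hd'
        apply congrArg
        apply List.map_congr_left
        intro m hm
        have hma : m ≠ a := ((PySem.Set.mem_discard _ _ _).mp hm).2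
        unfold pvTerm
        rw [hd' m hma, List.count_cons_of_ne (Ne.symm hma)]
      cases hget : d.get? a with
      | none =>
          have hcap : d.getD a 0 = 0 := PySem.Dict.getD_of_get?_eq_none d 0 hget
          have hterm : pvTerm (a :: xs) d a = 0 := by simp [pvTerm, hcap]
          simp only [pvGreedy, hget]
          rw [ih d hnd, hterm, zero_add, hsub d (fun _ _ => rfl)]
          by_cases hmem : a ∈ PySem.Set.ofList xs
          · rw [pvSum_split _ (pvTerm xs d) a (PySem.Set.nodup_ofList xs) hmem]
            have : pvTerm xs d a = 0 := by simp [pvTerm, hcap]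
            rw [this, zero_add]
          · rw [pvDiscard_not_mem _ _ hmem]
      | some v =>
          have hcap : d.getD a 0 = v := PySem.Dict.getD_of_get?_eq_some d 0 hget
          by_cases hv : v ≥ 1
          · simp only [pvGreedy, hget, hv, if_pos]
            set d' := d.insert a (v - 1) with hd'
            have hnd' : d'.keys.Nodup := PySem.Dict.nodup_keys_insert d a (v - 1) hnd
            rw [ih d' hnd']
            have hgd' : ∀ m, m ≠ a → d'.getD m 0 = d.getD m 0 := by
              intro m hma; rw [hd', PySem.Dict.getD_insert]; simp [hma]
            have hda' : d'.getD a 0 = v - 1 := by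
              rw [hd', PySem.Dict.getD_insert]; simp
            have htermA : pvTerm (a :: xs) d a = min ((xs.count a : Int) + 1) v := by
              simp [pvTerm, hcap, List.count_cons_self]
              intro h; omega
            have htermA' : pvTerm xs d' a = min (xs.count a : Int) (v - 1) := by
              unfold pvTerm
              rw [hda']
              split_ifs with h1
              · rfl
              · have hc : (0 : Int) ≤ (xs.count a : Int) := Int.natCast_nonneg _
                omega
            rw [hsub d' hgd', htermA]
            by_cases hmem : a ∈ PySem.Set.ofList xs
            · rw [pvSum_split _ (pvTerm xs d') a (PySem.Set.nodup_ofList xs) hmem, htermA']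
              have hc : (0 : Int) ≤ (xs.count a : Int) := Int.natCast_nonneg _
              omega
            · rw [pvDiscard_not_mem _ _ hmem]
              have hc0 : xs.count a = 0 := List.count_eq_zero.mpr
                (fun h => hmem ((PySem.Set.mem_ofList xs a).mpr h))
              rw [hc0]
              simp only [Nat.cast_zero]
              omega
          · simp only [pvGreedy, hget]
            rw [if_neg hv]
            have hterm : pvTerm (a :: xs) d a = 0 := by
              simp [pvTerm, hcap]; intro h; omega
            rw [ih d hnd, hterm, zero_add, hsub d (fun _ _ => rfl)]
            by_cases hmem : a ∈ PySem.Set.ofList xs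
            · rw [pvSum_split _ (pvTerm xs d) a (PySem.Set.nodup_ofList xs) hmem]
              have : pvTerm xs d a = 0 := by
                simp [pvTerm, hcap]; intro h; omega
              rw [this, zero_add]
            · rw [pvDiscard_not_mem _ _ hmem]

theorem pvPrefix_len (l : List Int) :
    ((l.foldl (fun (st : List Int × Int) x => (st.1 ++ [st.2 + x], st.2 + x)) ([0], 0)).1).length
      = l.length + 1 := by
  rw [pvPrefix_fold]; simp

-- the zipped prefix slices enumerate exactly the indexed prefix pairs
theorem pvZip_eq (pf : List Int) (n : Nat) (hlen : pf.length = 2 * n + 1) (i : Int)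
    (h1 : 1 ≤ i) (h2 : i < (n : Int)) :
    (PySem.List.slice pf (some i) (some (i + (n : Int)))).zip pf
      = (PySem.List.pyRange 0 (n : Int)).map
          (fun j => (PySem.List.pyGetD pf (j + i) 0, PySem.List.pyGetD pf j 0)) := by
  obtain ⟨m, rfl⟩ : ∃ m : Nat, i = (m : Int) := ⟨i.toNat, (Int.toNat_of_nonneg (by omega)).symm⟩
  have hm : m < n := by exact_mod_cast h2
  have hcast : ((m : Int) + (n : Int)) = ((m + n : Nat) : Int) := by push_cast; ring
  rw [hcast, PySem.List.slice_natCast, PySem.List.pyRange_one]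
  apply List.ext_getElem
  · simp [hlen]; omega
  · intro k hk1 hk2
    have hkn : k < n := by
      simp [hlen] at hk1; omega
    simp only [List.getElem_zip, List.getElem_take, List.getElem_drop, List.getElem_map,
      List.getElem_range]
    have e1 : (0 : Int) + (k : Int) + (m : Int) = ((k + m : Nat) : Int) := by push_cast; ring
    have e2 : ((0 : Int) + (k : Int)) = ((k : Nat) : Int) := by ring
    rw [e1, e2, PySem.List.pyGetD_natCast, PySem.List.pyGetD_natCast,
      List.getD_eq_getElem _ _ (by omega), List.getD_eq_getElem _ _ (by omega)]
    refine Prod.ext ?_ rfl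
    simp only
    congr 1
    omega

-- B's counter equals Counter(A's spectrum)
theorem pvCounts_eq (p : List Int) :
    ((PySem.List.pyRange 1 (p.length : Int)).foldl (fun counts i =>
        ((PySem.List.slice (((p ++ p).foldl (fun (st : List Int × Int) x => (st.1 ++ [st.2 + x], st.2 + x)) ([0], 0)).1) (some i) (some (i + (p.length : Int)))).zip (((p ++ p).foldl (fun (st : List Int × Int) x => (st.1 ++ [st.2 + x], st.2 + x)) ([0], 0)).1)).foldl
          (fun counts q => counts.modify (q.1 - q.2) 0 (· + 1))
          counts)
        (PySem.Dict.empty.insert 0 1)).modify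
      (PySem.List.pyGetD ((((p ++ p).foldl (fun (st : List Int × Int) x => (st.1 ++ [st.2 + x], st.2 + x)) ([0], 0)).1)) (p.length : Int) 0) 0 (· + 1)
      = PySem.Dict.counter (pvCyclospectrum p) := by
  set pf := (((p ++ p).foldl (fun (st : List Int × Int) x => (st.1 ++ [st.2 + x], st.2 + x)) ([0], 0)).1) with hpf
  have hlen : ((p.length : Int)) ≤ ((p ++ p).length : Int) := by
    rw [List.length_append]; push_cast; omega
  have hpflen : pf.length = 2 * p.length + 1 := by
    rw [hpf, pvPrefix_len, List.length_append]; omega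
  have htot : PySem.List.pyGetD pf (p.length : Int) 0 = p.sum := by
    rw [hpf, pvPrefix_get _ _ (Int.natCast_nonneg _) hlen]
    simp
  -- pointwise equality of the fed masses inside the nested fold
  have hcong : ∀ (c : PySem.Dict Int Int),
      (PySem.List.pyRange 1 (p.length : Int)).foldl (fun counts i =>
        (PySem.List.pyRange 0 (p.length : Int)).foldl (fun counts j =>
          counts.modify (PySem.List.pyGetD pf (j + i) 0 - PySem.List.pyGetD pf j 0) 0 (· + 1)) counts) c
      = (PySem.List.pyRange 1 (p.length : Int)).foldl (fun counts i =>
        (PySem.List.pyRange 0 (p.length : Int)).foldl (fun counts j =>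
          counts.modify ((PySem.List.slice (p ++ p) (some j) (some (j + i))).sum) 0 (· + 1)) counts) c := by
    intro c
    apply PySem.List.foldl_congr_mem
    intro acc i hi
    apply PySem.List.foldl_congr_mem
    intro acc' j hj
    have hi' := PySem.List.mem_pyRange_one.mp hi
    have hj' := PySem.List.mem_pyRange_one.mp hj
    have h0j : (0 : Int) ≤ j := hj'.1
    have hji : j ≤ j + i := by omega
    have hub : j + i ≤ ((p ++ p).length : Int) := by
      rw [List.length_append]; push_cast; omega
    rw [pvSliceSum (p ++ p) j (j + i) h0j hji, hpf,
      pvPrefix_get _ _ h0j (le_trans hji hub), pvPrefix_get _ _ (by omega) hub]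
  have hzipfold : ∀ (c : PySem.Dict Int Int),
      (PySem.List.pyRange 1 (p.length : Int)).foldl (fun counts i =>
        ((PySem.List.slice pf (some i) (some (i + (p.length : Int)))).zip pf).foldl
          (fun counts q => counts.modify (q.1 - q.2) 0 (· + 1)) counts) c
      = (PySem.List.pyRange 1 (p.length : Int)).foldl (fun counts i =>
        (PySem.List.pyRange 0 (p.length : Int)).foldl (fun counts j =>
          counts.modify (PySem.List.pyGetD pf (j + i) 0 - PySem.List.pyGetD pf j 0) 0 (· + 1)) counts) c := by
    intro c
    apply PySem.List.foldl_congr_mem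
    intro acc i hi
    have hi' := PySem.List.mem_pyRange_one.mp hi
    rw [pvZip_eq pf p.length hpflen i hi'.1 hi'.2, List.foldl_map]
  rw [hzipfold, hcong, htot]
  -- now both sides are modify-folds over the same mass lists
  rw [pvCyclospectrum_eq, PySem.Dict.counter_eq_foldl]
  rw [List.foldl_append, List.foldl_append]
  have hstart : (PySem.Dict.empty.modify (0 : Int) 0 (· + 1) : PySem.Dict Int Int)
      = PySem.Dict.empty.insert 0 1 := by decide
  simp only [List.foldl_cons, List.foldl_nil, hstart]
  unfold pvMids
  rw [List.foldl_flatMap]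
  apply congrArg (fun dd : PySem.Dict Int Int => dd.modify p.sum 0 (· + 1))
  apply PySem.List.foldl_congr_mem
  intro acc i _
  rw [List.foldl_map]

-- B's items fold is the pvTerm sum
theorem pvItemsFold (spec : List Int) (d : PySem.Dict Int Int) :
    (PySem.Dict.counter spec).items.foldl (fun score q =>
        let cap := d.getD q.1 0
        if cap > 0 then score + min q.2 cap else score) 0
      = ((PySem.Set.ofList spec).map (pvTerm spec d)).sum := by
  rw [PySem.Dict.items_counter, List.foldl_map]
  rw [PySem.List.foldl_congr_mem _
      (fun score k => if d.getD k 0 > 0 then score + min ((spec.count k : Int)) (d.getD k 0) else score)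
      (fun score k => score + pvTerm spec d k) 0
      (fun acc x _ => by
        show (if d.getD x 0 > 0 then acc + min ((spec.count x : Int)) (d.getD x 0) else acc)
          = acc + pvTerm spec d x
        unfold pvTerm; split_ifs <;> simp)]
  rw [PySem.List.foldl_add]
  simp

-- the per-peptide equality
theorem pvScore_eq (p : List Int) (d : PySem.Dict Int Int) (hnd : d.keys.Nodup) :
    pvGetScore p d = pvScoreFast p d := by
  unfold pvGetScore pvScoreFast
  rw [pvGetScore_eq_greedy, zero_add, pvGreedy_eq_sum _ _ hnd]
  simp only []
  rw [pvCounts_eq, pvItemsFold]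

-- ===== VERDICT (by name: the statement is the Claim_ definition above) =====
theorem expand_candidates_spec : Claim_equal_expand_candidates := by
  intro candidates dcs aas _
  unfold Spec_expand_candidates expand_candidates expand_candidates_alt
  simp only []
  rw [PySem.List.foldl_congr_mem _ _
    (fun nc c => nc ++ aas.map (fun acid =>
      (pvGetScore (c.2 ++ [acid]) (PySem.Dict.ofList dcs), c.2 ++ [acid]))) _
    (fun acc c _ => PySem.List.foldl_append_singleton_eq_map
      (fun acid => (pvGetScore (c.2 ++ [acid]) (PySem.Dict.ofList dcs), c.2 ++ [acid])) aas acc)]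
  rw [PySem.List.foldl_append_eq_flatMap]
  simp only [List.nil_append]
  apply congrArg₂ _ _ rfl
  funext c
  apply List.map_congr_left
  intro acid _
  rw [pvScore_eq _ _ (PySem.Dict.nodup_keys_ofList dcs)]
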